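-- pv_equiv track=rewrite | github.com/Houssamhgh/pychatbot-houari-ratsimbazafy-int | main.py | tokenization_of_question
-- ===== SOURCE A (Python) =====
-- def tokenization_of_question(qst):
--     """Takes a question as a string in parameter and returns a cleaned version of it as a list of words (lowercase and with no punctuation), thus tokenizing the question."""
--     qst = str(qst)
--     txt = qst
--
--     txt1 = ''
--     punc = (',', "'", ";", ':', '!', '?', '-', '_', '(', ')', '/', '.')#removing ponctuation from the questions
--
--     for word in txt:
--         for char in word:
--             if char not in punc:
--                 txt1 += char
--             else:
--                 txt1 += ' '
--     txt = txt1
--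
--     # putting the letters into lower case
--     text1 = ''
--     for word in txt:
--         for letter in word:
--             if 64 < ord(letter) and ord(letter) < 91 :
--                 text1 += chr(ord(letter) + 32)
--             else:
--                 text1 += letter
--     txt = text1
--     lquest = txt.split()
--
--     return lquest
-- ===== SOURCE B (Python) =====
-- def tokenization_of_question(qst):
--     """Single-pass tokenizer: lowercase each ASCII uppercase char, emit a word on
--     punctuation/whitespace separators, instead of building two cleaned strings and splitting."""
--     qst = str(qst)
--     punc = (',', "'", ";", ':', '!', '?', '-', '_', '(', ')', '/', '.')
--     result = []
--     buf = ''
--     for ch in qst: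
--         o = ord(ch)
--         if 64 < o < 91:
--             ch = chr(o + 32)
--         if ch in punc or ch.isspace():
--             if buf:
--                 result.append(buf)
--                 buf = ''
--         else:
--             buf += ch
--     if buf:
--         result.append(buf)
--     return result
-- ===== Notes on version B (the rewrite author's own statement) =====
-- stated objective: alternative
-- what changed: Replaces A's two full string-rebuilding passes (punctuation-to-space, then lowercase) followed by str.split() with a single pass over the characters that lowercases each char and emits tokens directly via a word buffer.
import Mathlib
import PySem

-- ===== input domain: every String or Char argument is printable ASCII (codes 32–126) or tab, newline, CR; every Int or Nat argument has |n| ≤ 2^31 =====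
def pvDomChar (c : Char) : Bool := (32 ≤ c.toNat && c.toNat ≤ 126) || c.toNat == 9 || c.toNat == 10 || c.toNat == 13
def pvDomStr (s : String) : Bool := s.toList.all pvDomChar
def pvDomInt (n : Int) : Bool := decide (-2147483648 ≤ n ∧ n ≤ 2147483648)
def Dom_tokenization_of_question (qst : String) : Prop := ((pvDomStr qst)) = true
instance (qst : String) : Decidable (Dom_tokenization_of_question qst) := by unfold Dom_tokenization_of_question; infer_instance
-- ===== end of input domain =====

-- B replaces A's two cleaned-string-building passes + split() by a single pass over the
-- characters that emits tokens directly (objective: alternative decomposition, one pass).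


-- the 12-punctuation tuple both Pythons share
def pvPunc : List Char := [',', '\'', ';', ':', '!', '?', '-', '_', '(', ')', '/', '.']

-- ===== PORT A =====
def tokenization_of_question (qst : String) : List String :=
  let txt := qst.toList
  -- first loop: replace punctuation by a space
  let txt1 := txt.foldl (fun acc c =>
    if pvPunc.contains c = false then acc ++ [c] else acc ++ [' ']) []
  -- second loop: chr(ord+32) for 64 < ord < 91
  let text1 := txt1.foldl (fun acc c =>
    if 64 < c.toNat ∧ c.toNat < 91 then acc ++ [Char.ofNat (c.toNat + 32)] else acc ++ [c]) []
  PySem.Str.split₀ (String.ofList text1)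

-- ===== PORT B =====
-- the single pass of Source B: buf is the current word, res the words already emitted
def pvBGo : List Char → List Char → List (List Char) → List (List Char)
  | [], buf, res => if buf.isEmpty then res else res ++ [buf]
  | c :: rest, buf, res =>
    let c' := if 64 < c.toNat ∧ c.toNat < 91 then Char.ofNat (c.toNat + 32) else c
    if pvPunc.contains c' || PySem.Chars.isspace c' then
      if buf.isEmpty then pvBGo rest [] res else pvBGo rest [] (res ++ [buf])
    else pvBGo rest (buf ++ [c']) res

def tokenization_of_question_alt (qst : String) : List String :=
  (pvBGo qst.toList [] []).map String.ofList

-- ===== PRECONDITION & SPEC =====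
def Spec_tokenization_of_question (qst : String) (out : List String) : Prop := out = tokenization_of_question_alt qst
instance (qst : String) (out : List String) : Decidable (Spec_tokenization_of_question qst out) := by unfold Spec_tokenization_of_question; infer_instance

-- ===== CLAIM (what is proved, stated in full; the proofs are below) =====
def Claim_equal_tokenization_of_question : Prop := ∀ (qst : String), Dom_tokenization_of_question qst → Spec_tokenization_of_question qst (tokenization_of_question qst)

-- ===== LEMMAS AND PROOFS =====

-- A's composite per-character map: punctuation → ' ', then ASCII lowercase
def pvF1 (c : Char) : Char := if pvPunc.contains c = false then c else ' '
def pvLow (c : Char) : Char := if 64 < c.toNat ∧ c.toNat < 91 then Char.ofNat (c.toNat + 32) else c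
def pvG (c : Char) : Char := pvLow (pvF1 c)

lemma foldA1 (cs : List Char) (acc : List Char) :
    cs.foldl (fun acc c => if pvPunc.contains c = false then acc ++ [c] else acc ++ [' ']) acc
      = acc ++ cs.map pvF1 := by
  induction cs generalizing acc with
  | nil => simp
  | cons c rest ih =>
    rw [List.foldl_cons]
    split_ifs with h
    · rw [ih]
      have hn : c ∉ pvPunc := by simpa using h
      simp [pvF1, hn]
    · rw [ih]
      have hy : c ∈ pvPunc := by simpa using h
      simp [pvF1, hy]

lemma foldA2 (cs : List Char) (acc : List Char) :
    cs.foldl (fun acc c => if 64 < c.toNat ∧ c.toNat < 91 then acc ++ [Char.ofNat (c.toNat + 32)] else acc ++ [c]) acc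
      = acc ++ cs.map pvLow := by
  induction cs generalizing acc with
  | nil => simp
  | cons c rest ih => rw [List.foldl_cons]; split_ifs with h <;> simp [ih, pvLow, h]

lemma punc_toNat {c : Char} (h : c ∈ pvPunc) : c.toNat ≤ 95 ∧ ¬ PySem.Chars.isspace c ∧ ¬ (64 < c.toNat ∧ c.toNat < 91) := by
  fin_cases h <;> decide

lemma low_toNat {c : Char} (h : 64 < c.toNat ∧ c.toNat < 91) :
    (Char.ofNat (c.toNat + 32)).toNat = c.toNat + 32 := by
  rw [Char.toNat_ofNat, if_pos]
  exact Or.inl (by omega)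

lemma not_punc_of_toNat {c : Char} (h₁ : 95 < c.toNat) : pvPunc.contains c = false := by
  by_contra h
  have hm : c ∈ pvPunc := by
    simpa using (Bool.not_eq_false _).mp h
  exact absurd (punc_toNat hm).1 (by omega)

lemma isspace_false_of_range {c : Char} (h₁ : 64 < c.toNat) (h₂ : c.toNat < 123) :
    PySem.Chars.isspace c = false := by
  simp [PySem.Chars.isspace]
  omega

-- the per-character correspondence: B's separator test on the lowered char
-- equals isspace of A's composite map, and on non-separators the chars agree
lemma sep_eq (c : Char) :
    (pvPunc.contains (pvLow c) || PySem.Chars.isspace (pvLow c)) = PySem.Chars.isspace (pvG c) := by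
  by_cases hp : pvPunc.contains c = true
  · have hm : c ∈ pvPunc := by simpa using hp
    obtain ⟨h1, h2, h3⟩ := punc_toNat hm
    have hlow : pvLow c = c := by simp [pvLow, h3]
    have hg : pvG c = ' ' := by simp [pvG, pvF1, hm]; decide
    rw [hlow, hg, hp]
    simp
    decide
  · have hp' : pvPunc.contains c = false := by simpa using hp
    have hnm : c ∉ pvPunc := by simpa using hp
    have hg : pvG c = pvLow c := by simp [pvG, pvF1, hnm]
    rw [hg]
    by_cases hu : 64 < c.toNat ∧ c.toNat < 91
    · have hlow : pvLow c = Char.ofNat (c.toNat + 32) := by simp [pvLow, hu]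
      have ht : (pvLow c).toNat = c.toNat + 32 := by rw [hlow]; exact low_toNat hu
      rw [not_punc_of_toNat (by omega), isspace_false_of_range (c := pvLow c) (by omega) (by omega)]
      simp
    · have hlow : pvLow c = c := by simp [pvLow, hu]
      rw [hlow, hp']
      simp

lemma main_go (cs : List Char) (buf : List Char) (res : List (List Char)) :
    pvBGo cs buf res = PySem.Chars.split₀.go (cs.map pvG) buf.reverse res.reverse := by
  induction cs generalizing buf res with
  | nil =>
    rw [pvBGo, List.map_nil, PySem.Chars.split₀.go]
    by_cases hb : buf.isEmpty <;> simp [hb]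
  | cons c rest ih =>
    rw [pvBGo, List.map_cons, PySem.Chars.split₀.go]
    rw [show (if 64 < c.toNat ∧ c.toNat < 91 then Char.ofNat (c.toNat + 32) else c) = pvLow c from rfl]
    rw [← sep_eq c]
    by_cases hs : (pvPunc.contains (pvLow c) || PySem.Chars.isspace (pvLow c)) = true
    · rw [if_pos hs, if_pos hs]
      by_cases hb : buf.isEmpty = true
      · have hb' : buf = [] := by simpa [List.isEmpty_iff] using hb
        subst hb'
        simpa using ih [] res
      · rw [if_neg hb, if_neg (by simpa using hb)]
        have := ih [] (res ++ [buf])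
        simpa using this
    · rw [if_neg hs, if_neg hs]
      have hpc : pvPunc.contains c = false := by
        by_contra hpc
        have hm : c ∈ pvPunc := by simpa using (Bool.not_eq_false _).mp hpc
        have h3 := (punc_toNat hm).2.2
        have hlow : pvLow c = c := by simp [pvLow, h3]
        apply hs
        rw [hlow]
        simp [hm]
      have hnm : c ∉ pvPunc := by simpa using hpc
      have hg : pvG c = pvLow c := by simp [pvG, pvF1, hnm]
      rw [← hg]
      simpa [hg] using ih (buf ++ [pvLow c]) res

lemma split₀_str (s : String) :
    PySem.Str.split₀ s = (PySem.Chars.split₀ s.toList).map String.ofList := by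
  rw [← PySem.Str.split₀_map_toList, List.map_map]
  simp [Function.comp_def, String.ofList_toList]

-- ===== VERDICT (by name: the statement is the Claim_ definition above) =====
theorem tokenization_of_question_spec : Claim_equal_tokenization_of_question := by
  intro qst _
  unfold Spec_tokenization_of_question tokenization_of_question tokenization_of_question_alt
  dsimp only
  rw [foldA1, foldA2, List.nil_append, List.nil_append, main_go, split₀_str]
  have hmm : (List.map pvF1 qst.toList).map pvLow = qst.toList.map pvG := by
    rw [List.map_map]; rfl
  have hmk : (String.ofList (qst.toList.map pvG)).toList = qst.toList.map pvG :=
    String.toList_ofList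
  rw [hmm, hmk]
  rfl
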